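-- pv_equiv track=rewrite | github.com/kazilab/carcinogen_harmonizer | carcinogen_harmonizer/sources/iarc.py | _slice_balanced_array
-- ===== SOURCE A (Python) =====
-- def _slice_balanced_array(text: str, start: int) -> str | None:
--     """Return the substring starting at ``start`` that contains a balanced JS array."""
--     if start >= len(text) or text[start] != "[":
--         return None
--     depth = 0
--     in_string = False
--     quote_char = ""
--     escaped = False
--     for i in range(start, len(text)):
--         ch = text[i]
--         if in_string:
--             if escaped:
--                 escaped = False
--             elif ch == "\\":
--                 escaped = True
--             elif ch == quote_char:
--                 in_string = False
--             continue
--         if ch in ("'", '"'):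
--             in_string = True
--             quote_char = ch
--             continue
--         if ch == "[":
--             depth += 1
--         elif ch == "]":
--             depth -= 1
--             if depth == 0:
--                 return text[start : i + 1]
--     return None
-- ===== SOURCE B (Python) =====
-- def _mask_strings(s: str) -> str:
--     """Copy of s (same length) with every quoted JS string literal, quotes included,
--     replaced by spaces (backslash escapes a character; an unterminated literal is
--     masked to the end)."""
--     out = []
--     i = 0
--     n = len(s)
--     while i < n:
--         c = s[i]
--         if c == "'" or c == '"':
--             j = i + 1
--             while j < n:
--                 if s[j] == "\\":
--                     j += 2
--                 elif s[j] == c: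
--                     j += 1
--                     break
--                 else:
--                     j += 1
--             j = min(j, n)
--             out.append(" " * (j - i))
--             i = j
--         else:
--             out.append(c)
--             i += 1
--     return "".join(out)
--
--
-- def _slice_balanced_array(text: str, start: int) -> str | None:
--     """Return the substring starting at ``start`` that contains a balanced JS array."""
--     if start < 0 or start >= len(text) or text[start] != "[":
--         return None
--     depth = 0
--     for i, ch in enumerate(_mask_strings(text[start:])):
--         if ch == "[":
--             depth += 1
--         elif ch == "]":
--             depth -= 1
--             if depth == 0:
--                 return text[start : start + i + 1]
--     return None
-- ===== Notes on version B (the rewrite author's own statement) =====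
-- stated objective: alternative
-- what changed: Replaces A's single-pass state machine (in_string/quote_char/escaped flags interleaved with depth counting) by two staged passes: a first pass masks every quoted string literal out of text[start:] (replacing it, quotes included, with spaces), and a second pass does plain bracket-depth counting over the masked copy.
-- outside the precondition, e.g. on _slice_balanced_array('[]', -2): A returns '', B returns None; on _slice_balanced_array('', -1): A raises IndexError, B returns None
import Mathlib
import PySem

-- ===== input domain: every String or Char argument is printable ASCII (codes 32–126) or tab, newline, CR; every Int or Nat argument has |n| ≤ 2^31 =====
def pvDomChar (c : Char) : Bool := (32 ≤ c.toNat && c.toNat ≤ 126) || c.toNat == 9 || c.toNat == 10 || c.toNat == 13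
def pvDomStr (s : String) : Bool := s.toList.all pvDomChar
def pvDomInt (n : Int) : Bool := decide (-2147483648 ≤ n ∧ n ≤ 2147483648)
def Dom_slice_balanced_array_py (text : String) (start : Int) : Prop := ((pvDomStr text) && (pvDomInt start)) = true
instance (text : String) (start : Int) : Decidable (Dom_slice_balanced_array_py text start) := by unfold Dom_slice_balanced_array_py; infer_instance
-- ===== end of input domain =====

-- B replaces A's single-pass flag state machine by two staged passes: mask string
-- literals to spaces, then count bracket depth on the masked copy (objective: alternative).

-- ===== PORT A =====
-- A's for-loop over range(start, len(text)) with state (depth, in_string, quote_char, escaped).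
-- quote_char = "" is modelled by ' ' (it is only compared after being assigned a real quote);
-- text[i] is in range for every i the loop visits when start ≥ 0, so .getD ' ' is never used.
def sliceALoop (l : List Char) (start : Int) :
    List Int → Int → Bool → Char → Bool → Option String
  | [], _, _, _, _ => none
  | i :: rest, depth, instr, quote, esc =>
    let ch := (PySem.List.pyGet? l i).getD ' '
    if instr then
      if esc then sliceALoop l start rest depth instr quote false
      else if ch = '\\' then sliceALoop l start rest depth instr quote true
      else if ch = quote then sliceALoop l start rest depth false quote esc
      else sliceALoop l start rest depth instr quote esc
    else if ch = '\'' ∨ ch = '"' then sliceALoop l start rest depth true ch esc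
    else if ch = '[' then sliceALoop l start rest (depth + 1) instr quote esc
    else if ch = ']' then
      if depth - 1 = 0 then some (String.ofList (PySem.List.slice l (some start) (some (i + 1))))
      else sliceALoop l start rest (depth - 1) instr quote esc
    else sliceALoop l start rest depth instr quote esc

-- text[start] raises IndexError when start < -len(text); the port returns none there (outside Pre_).
def slice_balanced_array_py (text : String) (start : Int) : Option String :=
  let l := text.toList
  if start ≥ (l.length : Int) ∨ (PySem.Str.pyGet? text start).getD ' ' ≠ '[' then none
  else sliceALoop l start (PySem.List.pyRange start (l.length : Int) 1) 0 false ' ' false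

-- ===== PORT B =====
-- inner while loop of _mask_strings: index just past the closing quote q, scanning from j
-- (backslash advances two). fuel is a totality guard only; fuel = l.length suffices.
def maskSkip (l : List Char) (q : Char) : Nat → Nat → Nat
  | 0, j => j
  | fuel + 1, j =>
    if _h : j < l.length then
      if l[j] = '\\' then maskSkip l q fuel (j + 2)
      else if l[j] = q then j + 1
      else maskSkip l q fuel (j + 1)
    else j

-- outer while loop of _mask_strings, emitting the masked characters from index i onward
-- (out.append(" " * (j - i)) becomes List.replicate, the final "".join is the list itself).
-- fuel is a totality guard only: i strictly increases, so fuel = l.length + 1 suffices.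
def maskLoop (l : List Char) : Nat → Nat → List Char
  | 0, _ => []
  | fuel + 1, i =>
    if _h : i < l.length then
      let c := l[i]
      if c = '\'' ∨ c = '"' then
        let j := min (maskSkip l c l.length (i + 1)) l.length
        List.replicate (j - i) ' ' ++ maskLoop l fuel j
      else c :: maskLoop l fuel (i + 1)
    else []

-- Source B's "for i, ch in enumerate(...)" counting pass: structural recursion over the masked
-- characters carrying the running index i and the depth.
def countLoop (s : Nat) (l : List Char) : List Char → Nat → Int → Option String
  | [], _, _ => none
  | ch :: rest, i, depth =>
    if ch = '[' then countLoop s l rest (i + 1) (depth + 1)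
    else if ch = ']' then
      if depth - 1 = 0 then
        some (String.ofList (PySem.List.slice l (some (s : Int)) (some ((s : Int) + (i : Int) + 1))))
      else countLoop s l rest (i + 1) (depth - 1)
    else countLoop s l rest (i + 1) depth

def slice_balanced_array_py_alt (text : String) (start : Int) : Option String :=
  let l := text.toList
  if start < 0 ∨ start ≥ (l.length : Int) then none
  else if l.getD start.toNat ' ' ≠ '[' then none
  else
    let suf := PySem.List.slice l (some start) none   -- text[start:]
    countLoop start.toNat l (maskLoop suf (suf.length + 1) 0) 0 0

-- ===== PRECONDITION & SPEC =====
-- Pre_ restricts start to the natural domain 0 ≤ start: for negative start Python's index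
-- wraparound makes A scan from a wrapped position (returning accidental values such as '' on
-- ("[]", -2)) or raise IndexError (start < -len(text)); B naturally returns None there.
def Pre_slice_balanced_array_py (text : String) (start : Int) : Prop := 0 ≤ start
instance (text : String) (start : Int) : Decidable (Pre_slice_balanced_array_py text start) := by
  unfold Pre_slice_balanced_array_py; infer_instance

def pvWitness_slice_balanced_array_py : String × Int := ("[1, \"a]\", 2]", 0)

def Spec_slice_balanced_array_py (text : String) (start : Int) (out : Option String) : Prop :=
  out = slice_balanced_array_py_alt text start
instance (text : String) (start : Int) (out : Option String) :
    Decidable (Spec_slice_balanced_array_py text start out) := by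
  unfold Spec_slice_balanced_array_py; infer_instance

-- ===== CLAIM (what is proved, stated in full; the proofs are below) =====
def Claim_equal_slice_balanced_array_py : Prop :=
  ∀ (text : String) (start : Int), Dom_slice_balanced_array_py text start →
    Pre_slice_balanced_array_py text start →
    Spec_slice_balanced_array_py text start (slice_balanced_array_py text start)

-- ===== LEMMAS AND PROOFS =====

-- the inner masking loop never moves the index backwards
theorem le_maskSkip (l : List Char) (q : Char) :
    ∀ (fuel j : Nat), j ≤ maskSkip l q fuel j := by
  intro fuel
  induction fuel with
  | zero => intro j; simp [maskSkip]
  | succ fuel ih =>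
    intro j
    simp only [maskSkip]
    split_ifs with h1 h2 h3
    · exact le_trans (by omega) (ih (j + 2))
    · omega
    · exact le_trans (by omega) (ih (j + 1))
    · omega

-- the counting pass only skips over the spaces the masking pass emitted
theorem countLoop_replicate (s : Nat) (l : List Char) :
    ∀ (m : Nat) (rest : List Char) (i : Nat) (depth : Int),
      countLoop s l (List.replicate m ' ' ++ rest) i depth = countLoop s l rest (i + m) depth := by
  intro m
  induction m with
  | zero => intro rest i depth; simp
  | succ m ih =>
    intro rest i depth
    rw [List.replicate_succ, List.cons_append]
    simp only [countLoop, Char.reduceEq, if_false]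
    rw [ih]
    congr 1
    omega

-- A's escaped=true state just consumes one character of the string body
theorem escStep (l : List Char) (st : Int) (k : Nat) (depth : Int) (q : Char) :
    sliceALoop l st (PySem.List.pyRange ((k : Int) + 1) (l.length : Int) 1) depth true q true
      = sliceALoop l st (PySem.List.pyRange ((k : Int) + 2) (l.length : Int) 1) depth true q false := by
  by_cases h : k + 1 < l.length
  · rw [PySem.List.pyRange_one_cons (by exact_mod_cast h)]
    simp only [sliceALoop]
    rw [show ((k : Int) + 1 + 1) = (k : Int) + 2 from by ring]
    simp
  · rw [PySem.List.pyRange_one_eq_nil (by exact_mod_cast Nat.not_lt.mp h),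
        PySem.List.pyRange_one_eq_nil (by omega)]
    simp [sliceALoop]

-- main correspondence: A's combined flag machine from absolute index s+p equals B's
-- count-over-masked-suffix pass from local index p — outside a string (first conjunct)
-- and inside a string literal with quote q and escaped=False (second conjunct)
theorem mainLoop (l : List Char) (s : Nat) (hs : s ≤ l.length) :
    ∀ m p, l.length - (s + p) ≤ m →
      (∀ (depth : Int) (q : Char) (F : Nat), (l.drop s).length - p < F →
        sliceALoop l (s : Int) (PySem.List.pyRange ((s + p : Nat) : Int) (l.length : Int) 1)
            depth false q false
          = countLoop s l (maskLoop (l.drop s) F p) p depth) ∧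
      (∀ (depth : Int) (q : Char) (G F : Nat), q ≠ '\\' →
          (l.drop s).length - p ≤ G →
          (l.drop s).length - min (maskSkip (l.drop s) q G p) (l.drop s).length < F →
        sliceALoop l (s : Int) (PySem.List.pyRange ((s + p : Nat) : Int) (l.length : Int) 1)
            depth true q false
          = countLoop s l
              (maskLoop (l.drop s) F (min (maskSkip (l.drop s) q G p) (l.drop s).length))
              (min (maskSkip (l.drop s) q G p) (l.drop s).length) depth) := by
  intro m
  induction m with
  | zero =>
    intro p hp
    have hnp : (l.drop s).length ≤ p := by simp [List.length_drop]; omega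
    have hnil : PySem.List.pyRange ((s + p : Nat) : Int) (l.length : Int) 1 = [] :=
      PySem.List.pyRange_one_eq_nil (by exact_mod_cast (by omega : l.length ≤ s + p))
    have hmask : ∀ F k, (l.drop s).length ≤ k → maskLoop (l.drop s) F k = [] := by
      intro F k hk
      cases F with
      | zero => rw [maskLoop]
      | succ F => rw [maskLoop, dif_neg (Nat.not_lt.mpr hk)]
    constructor
    · intro depth q F hF
      rw [hnil, hmask F p hnp]
      simp [sliceALoop, countLoop]
    · intro depth q G F hq hG hF
      have hsk : maskSkip (l.drop s) q G p = p := by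
        cases G with
        | zero => rw [maskSkip]
        | succ G => rw [maskSkip, dif_neg (Nat.not_lt.mpr hnp)]
      have hmin : min (maskSkip (l.drop s) q G p) (l.drop s).length = (l.drop s).length := by
        rw [hsk]; omega
      rw [hnil, hmin, hmask F (l.drop s).length (le_refl _)]
      simp [sliceALoop, countLoop]
  | succ m ih =>
    intro p hp
    by_cases hpn : s + p < l.length
    case neg => exact ih p (by omega)
    have hplt : p < (l.drop s).length := by simp [List.length_drop]; omega
    have hcons : PySem.List.pyRange ((s + p : Nat) : Int) (l.length : Int) 1
        = ((s + p : Nat) : Int) :: PySem.List.pyRange (((s + p : Nat) : Int) + 1) (l.length : Int) 1 :=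
      PySem.List.pyRange_one_cons (by exact_mod_cast hpn)
    have hch : (PySem.List.pyGet? l ((s + p : Nat) : Int)).getD ' ' = l[s + p] := by
      rw [PySem.List.pyGet?_natCast]
      simp [List.getElem?_eq_getElem hpn]
    have hdrop : (l.drop s)[p]'hplt = l[s + p]'hpn := by
      simp [List.getElem_drop]
    have hsucc : ((s + p : Nat) : Int) + 1 = ((s + (p + 1) : Nat) : Int) := by push_cast; ring
    have hsucc2 : ((s + p : Nat) : Int) + 2 = ((s + (p + 2) : Nat) : Int) := by push_cast; ring
    constructor
    · -- outside a string
      intro depth q F hF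
      obtain ⟨F', rfl⟩ : ∃ F', F = F' + 1 := ⟨F - 1, by omega⟩
      rw [hcons]
      simp only [maskLoop, dif_pos hplt, hdrop]
      by_cases h1 : l[s + p] = '\''
      · simp only [sliceALoop, hch, h1]
        simp only [Char.reduceEq, Bool.false_eq_true, if_false, or_false, if_true]
        rw [countLoop_replicate]
        have hj1 : p + 1 ≤ min (maskSkip (l.drop s) '\'' (l.drop s).length (p + 1)) (l.drop s).length := by
          have := le_maskSkip (l.drop s) '\'' (l.drop s).length (p + 1); omega
        rw [show p + (min (maskSkip (l.drop s) '\'' (l.drop s).length (p + 1)) (l.drop s).length - p)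
              = min (maskSkip (l.drop s) '\'' (l.drop s).length (p + 1)) (l.drop s).length from by omega]
        rw [hsucc]
        exact (ih (p + 1) (by omega)).2 depth '\'' (l.drop s).length F' (by decide) (by omega) (by omega)
      by_cases h2 : l[s + p] = '"'
      · simp only [sliceALoop, hch, h2]
        simp only [Char.reduceEq, Bool.false_eq_true, if_false, or_true, if_true]
        rw [countLoop_replicate]
        have hj1 : p + 1 ≤ min (maskSkip (l.drop s) '"' (l.drop s).length (p + 1)) (l.drop s).length := by
          have := le_maskSkip (l.drop s) '"' (l.drop s).length (p + 1); omega
        rw [show p + (min (maskSkip (l.drop s) '"' (l.drop s).length (p + 1)) (l.drop s).length - p)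
              = min (maskSkip (l.drop s) '"' (l.drop s).length (p + 1)) (l.drop s).length from by omega]
        rw [hsucc]
        exact (ih (p + 1) (by omega)).2 depth '"' (l.drop s).length F' (by decide) (by omega) (by omega)
      rw [if_neg (by simp [h1, h2])]
      by_cases h3 : l[s + p] = '['
      · simp only [sliceALoop, hch, h3]
        simp only [Char.reduceEq, Bool.false_eq_true, if_false, or_self, if_true]
        simp only [countLoop]
        rw [hsucc]
        exact (ih (p + 1) (by omega)).1 (depth + 1) q F' (by omega)
      by_cases h4 : l[s + p] = ']'
      · simp only [sliceALoop, hch, h4]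
        simp only [Char.reduceEq, Bool.false_eq_true, if_false, or_self, if_true]
        simp only [countLoop, Char.reduceEq, if_false]
        by_cases hd : depth - 1 = 0
        · simp only [hd, if_true]
          rw [show ((s + p : Nat) : Int) + 1 = (s : Int) + (p : Int) + 1 from by push_cast; ring]
        · simp only [hd, if_false]
          rw [hsucc]
          exact (ih (p + 1) (by omega)).1 (depth - 1) q F' (by omega)
      · simp only [sliceALoop, hch]
        simp only [h1, h2, h3, h4, Bool.false_eq_true, if_false, or_self]
        simp only [countLoop, if_neg h3, if_neg h4]
        rw [hsucc]
        exact (ih (p + 1) (by omega)).1 depth q F' (by omega)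
    · -- inside a string with quote q, escaped = False
      intro depth q G F hq hG hF
      obtain ⟨G', rfl⟩ : ∃ G', G = G' + 1 := ⟨G - 1, by omega⟩
      rw [hcons]
      have hunf : maskSkip (l.drop s) q (G' + 1) p
          = (if (l.drop s)[p]'hplt = '\\' then maskSkip (l.drop s) q G' (p + 2)
             else if (l.drop s)[p]'hplt = q then p + 1
             else maskSkip (l.drop s) q G' (p + 1)) := by
        rw [maskSkip, dif_pos hplt]
      by_cases hb : l[s + p] = '\\'
      · have hskip : maskSkip (l.drop s) q (G' + 1) p = maskSkip (l.drop s) q G' (p + 2) := by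
          rw [hunf, if_pos (by rw [hdrop]; exact hb)]
        rw [hskip] at hF ⊢
        simp only [sliceALoop, hch, hb]
        simp only [Bool.false_eq_true, if_false, if_true]
        rw [escStep, hsucc2]
        exact (ih (p + 2) (by omega)).2 depth q G' F hq (by omega) hF
      by_cases he : l[s + p] = q
      · have hskip : maskSkip (l.drop s) q (G' + 1) p = p + 1 := by
          rw [hunf, if_neg (by rw [hdrop]; exact hb), if_pos (by rw [hdrop]; exact he)]
        rw [hskip] at hF ⊢
        have hmin : min (p + 1) (l.drop s).length = p + 1 := by omega
        rw [hmin] at hF ⊢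
        simp only [sliceALoop, hch, he]
        simp only [hq, Bool.false_eq_true, if_false, if_true]
        rw [hsucc]
        exact (ih (p + 1) (by omega)).1 depth q F hF
      · have hskip : maskSkip (l.drop s) q (G' + 1) p = maskSkip (l.drop s) q G' (p + 1) := by
          rw [hunf, if_neg (by rw [hdrop]; exact hb), if_neg (by rw [hdrop]; exact he)]
        rw [hskip] at hF ⊢
        simp only [sliceALoop, hch]
        simp only [hb, he, Bool.false_eq_true, if_false, if_true]
        rw [hsucc]
        exact (ih (p + 1) (by omega)).2 depth q G' F hq (by omega) hF

theorem slice_balanced_array_py_spec : Claim_equal_slice_balanced_array_py := by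
  intro text start _hdom hpre
  unfold Spec_slice_balanced_array_py slice_balanced_array_py slice_balanced_array_py_alt
  have hpre' : 0 ≤ start := hpre
  set l := text.toList with hl
  obtain ⟨s, rfl⟩ : ∃ s : Nat, start = (s : Int) := ⟨start.toNat, (Int.toNat_of_nonneg hpre').symm⟩
  have hneg : ¬ ((s : Int) < 0) := by omega
  by_cases hrange : (s : Int) ≥ (l.length : Int)
  · simp [hrange, hneg]
  · have hs : s < l.length := by exact_mod_cast Int.not_le.mp hrange
    have hg : (PySem.Str.pyGet? text (s : Int)).getD ' ' = l[s] := by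
      simp [← hl, List.getElem?_eq_getElem hs]
    have hgd : l.getD ((s : Int)).toNat ' ' = l[s] := by
      simp [List.getD, List.getElem?_eq_getElem hs]
    by_cases hb : l[s] = '['
    · simp only [hg, hgd, hb, ne_eq]
      rw [if_neg (by simp [hrange]), if_neg (by omega), if_neg (by simp)]
      rw [PySem.List.slice_from_natCast]
      have := (mainLoop l s (le_of_lt hs) (l.length - s) 0 (by omega)).1 0 ' '
        ((l.drop s).length + 1) (by omega)
      simpa using this
    · have h5 : l[s]?.getD ' ' = l[s] := by simp [List.getElem?_eq_getElem hs]
      simp [← hl, h5, hb, hrange, hneg]
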